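-- pv_equiv track=rewrite | github.com/ace12358/WordSegmentation | src/new/ffnn_pointwise.py | label2seq
-- ===== SOURCE A (Python) =====
-- def label2seq(x, labels):
--     seq = list()
--     for i in range(len(x)):
--         if i == 0:
--             seq.append(x[i])
--         elif labels[i] == 0:
--             seq.append(' ')
--             seq.append(x[i])
--         else:
--             seq.append(x[i])
--     return seq
-- ===== SOURCE B (Python) =====
-- def label2seq(x, labels):
--     # Two-phase: partition into segments at label-0 boundaries, then join with ' '.
--     segs = []
--     cur = []
--     for i in range(len(x)):
--         if i > 0 and labels[i] == 0:
--             segs.append(cur)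
--             cur = [x[i]]
--         else:
--             cur.append(x[i])
--     if cur:
--         segs.append(cur)
--     res = []
--     for k, seg in enumerate(segs):
--         if k > 0:
--             res.append(' ')
--         res += seg
--     return res
-- ===== Notes on version B (the rewrite author's own statement) =====
-- stated objective: alternative
-- what changed: B replaces A's single pass that interleaves spaces while appending with a two-phase decomposition: first partition the characters into segments at label-0 boundaries, then join the segments with a single ' ' separator.
import Mathlib
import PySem

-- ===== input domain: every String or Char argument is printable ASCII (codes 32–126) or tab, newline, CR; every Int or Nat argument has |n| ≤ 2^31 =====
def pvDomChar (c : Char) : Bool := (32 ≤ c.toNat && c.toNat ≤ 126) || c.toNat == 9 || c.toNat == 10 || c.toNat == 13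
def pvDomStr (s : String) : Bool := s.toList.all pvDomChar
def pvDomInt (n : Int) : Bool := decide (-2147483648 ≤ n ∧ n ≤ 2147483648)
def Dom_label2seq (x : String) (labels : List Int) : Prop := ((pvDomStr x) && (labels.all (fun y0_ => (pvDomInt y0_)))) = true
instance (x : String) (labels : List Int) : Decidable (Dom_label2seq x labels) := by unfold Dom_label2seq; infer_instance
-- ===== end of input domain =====

-- B replaces A's single interleaving pass by a two-phase decomposition:
-- partition into segments at label-0 boundaries, then join segments with ' '.

-- ===== PORT A =====
-- x[i] as a one-character string (i is always in range inside Pre_)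
def chAt (cs : List Char) (i : Nat) : String := String.ofList [cs.getD i ' ']

-- the body of A's loop over i in range(len(x)); labels[i] is read only for i ≥ 1
-- (out-of-range labels access raises in Python and is excluded by Pre_; getD's default is never reached inside Pre_)
def aFold (labels : List Int) (cs : List Char) (n : Nat) : List String :=
  (List.range n).foldl
    (fun seq i =>
      if i = 0 then seq ++ [chAt cs i]
      else if labels.getD i 0 = 0 then seq ++ [" ", chAt cs i]
      else seq ++ [chAt cs i]) []

def label2seq (x : String) (labels : List Int) : List String :=
  aFold labels x.toList x.toList.length

-- ===== PORT B =====
-- phase 1 of Source B: the (segs, cur) state after the partition loop over range n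
def bState (labels : List Int) (cs : List Char) (n : Nat) : List (List String) × List String :=
  (List.range n).foldl
    (fun p i =>
      if 0 < i ∧ labels.getD i 0 = 0 then (p.1 ++ [p.2], [chAt cs i])
      else (p.1, p.2 ++ [chAt cs i])) ([], [])

-- phase 2 of Source B: concatenate segments inserting one " " between consecutive ones
def joinSp (segs : List (List String)) : List String :=
  match segs with
  | [] => []
  | s :: rest => rest.foldl (fun acc seg => acc ++ " " :: seg) s

def label2seq_alt (x : String) (labels : List Int) : List String :=
  let p := bState labels x.toList x.toList.length
  joinSp (if p.2.isEmpty then p.1 else p.1 ++ [p.2])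

-- ===== PRECONDITION & SPEC =====
-- Pre_ excludes exactly the inputs where the Python A raises IndexError:
-- len(x) ≥ 2 with labels shorter than x (labels[i] is read for i = 1 .. len(x)-1).
def Pre_label2seq (x : String) (labels : List Int) : Prop :=
  x.toList.length ≤ 1 ∨ x.toList.length ≤ labels.length
instance (x : String) (labels : List Int) : Decidable (Pre_label2seq x labels) := by unfold Pre_label2seq; infer_instance
def pvWitness_label2seq : String × List Int := ("abc", [1, 0, 1])

def Spec_label2seq (x : String) (labels : List Int) (out : List String) : Prop := out = label2seq_alt x labels
instance (x : String) (labels : List Int) (out : List String) : Decidable (Spec_label2seq x labels out) := by unfold Spec_label2seq; infer_instance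

-- ===== CLAIM (what is proved, stated in full; the proofs are below) =====
def Claim_equal_label2seq : Prop := ∀ (x : String) (labels : List Int), Dom_label2seq x labels → Pre_label2seq x labels → Spec_label2seq x labels (label2seq x labels)

-- ===== LEMMAS AND PROOFS =====

theorem joinSp_snoc (L : List (List String)) (seg : List String) (h : L ≠ []) :
    joinSp (L ++ [seg]) = joinSp L ++ " " :: seg := by
  cases L with
  | nil => exact absurd rfl h
  | cons s rest => simp [joinSp, List.foldl_append]

theorem joinSp_last_snoc (L : List (List String)) (c : List String) (e : String) :
    joinSp (L ++ [c ++ [e]]) = joinSp (L ++ [c]) ++ [e] := by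
  cases L with
  | nil => simp [joinSp]
  | cons s rest => simp [joinSp, List.foldl_append, List.append_assoc]

theorem aFold_succ_cut (labels : List Int) (cs : List Char) (n : Nat)
    (hn : n ≠ 0) (hl : labels[n]?.getD 0 = 0) :
    aFold labels cs (n + 1) = aFold labels cs n ++ [" ", chAt cs n] := by
  unfold aFold
  rw [List.range_succ, List.foldl_append]
  simp [hn, hl]

theorem aFold_succ_keep (labels : List Int) (cs : List Char) (n : Nat)
    (hn : n ≠ 0) (hl : ¬ labels[n]?.getD 0 = 0) :
    aFold labels cs (n + 1) = aFold labels cs n ++ [chAt cs n] := by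
  unfold aFold
  rw [List.range_succ, List.foldl_append]
  simp [hn, hl]

theorem bState_succ_cut (labels : List Int) (cs : List Char) (n : Nat)
    (hn : 0 < n) (hl : labels[n]?.getD 0 = 0) :
    bState labels cs (n + 1) = ((bState labels cs n).1 ++ [(bState labels cs n).2], [chAt cs n]) := by
  unfold bState
  rw [List.range_succ, List.foldl_append]
  simp [hn, hl]

theorem bState_succ_keep (labels : List Int) (cs : List Char) (n : Nat)
    (hl : ¬ (0 < n ∧ labels[n]?.getD 0 = 0)) :
    bState labels cs (n + 1) = ((bState labels cs n).1, (bState labels cs n).2 ++ [chAt cs n]) := by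
  unfold bState
  rw [List.range_succ, List.foldl_append]
  simp [hl]

theorem label2seq_inv (labels : List Int) (cs : List Char) (n : Nat) :
    (n = 0 → bState labels cs n = ([], [])) ∧
    (1 ≤ n → (bState labels cs n).2 ≠ [] ∧
      joinSp ((bState labels cs n).1 ++ [(bState labels cs n).2]) = aFold labels cs n) := by
  induction n with
  | zero => exact ⟨fun _ => rfl, fun h => by omega⟩
  | succ n ih =>
    refine ⟨fun h => by omega, fun _ => ?_⟩
    cases Nat.eq_zero_or_pos n with
    | inl h0 =>
      subst h0
      constructor
      · simp [bState, List.range_succ]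
      · simp [bState, aFold, joinSp, List.range_succ]
    | inr hpos =>
      obtain ⟨hcur, hjoin⟩ := ih.2 hpos
      by_cases hl : labels[n]?.getD 0 = 0
      · rw [bState_succ_cut labels cs n hpos hl]
        refine ⟨by simp, ?_⟩
        have hne : (bState labels cs n).1 ++ [(bState labels cs n).2] ≠ [] := by simp
        rw [joinSp_snoc _ _ hne, hjoin, aFold_succ_cut labels cs n (by omega) hl]
      · rw [bState_succ_keep labels cs n (by tauto)]
        refine ⟨by simp, ?_⟩
        rw [joinSp_last_snoc, hjoin, aFold_succ_keep labels cs n (by omega) hl]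

-- ===== VERDICT (by name: the statement is the Claim_ definition above) =====
theorem label2seq_spec : Claim_equal_label2seq := by
  intro x labels _ _
  unfold Spec_label2seq label2seq
  simp only [label2seq_alt]
  cases Nat.eq_zero_or_pos x.toList.length with
  | inl h0 =>
    rw [h0]
    simp [bState, aFold, joinSp]
  | inr hpos =>
    obtain ⟨hcur, hjoin⟩ := (label2seq_inv labels x.toList x.toList.length).2 hpos
    have hE : (bState labels x.toList x.toList.length).2.isEmpty = false := by
      simpa using hcur
    rw [hE, if_neg (by simp)]
    exact hjoin.symm
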